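-- pv_equiv track=rewrite | github.com/VenkateshwaraUsirikayala/Python_DS | array_solutions/avg_of_two_highest.py | find_max_sum_of_two
-- ===== SOURCE A (Python) =====
-- def find_max_sum_of_two(arr):
--     k=3
--     n=len(arr)
--     max_sum=window_sum=sum(arr[i] for i in range(k))
--     for i in range(n-k):
--         window_sum+=arr[i+k]-arr[i]
--         max_sum=max(window_sum,max_sum)
-- #     avg=max_sum/k
-- #     return avg
--     return max_sum
-- ===== SOURCE B (Python) =====
-- def find_max_sum_of_two(arr):
--     return max(arr[i] + arr[i + 1] + arr[i + 2] for i in range(len(arr) - 2))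
-- ===== Notes on version B (the rewrite author's own statement) =====
-- stated objective: simpler
-- what changed: Replaces the incremental sliding-window update (window_sum += arr[i+k]-arr[i] with a running max) by a one-line max over each 3-element window sum recomputed from scratch.
import Mathlib
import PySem

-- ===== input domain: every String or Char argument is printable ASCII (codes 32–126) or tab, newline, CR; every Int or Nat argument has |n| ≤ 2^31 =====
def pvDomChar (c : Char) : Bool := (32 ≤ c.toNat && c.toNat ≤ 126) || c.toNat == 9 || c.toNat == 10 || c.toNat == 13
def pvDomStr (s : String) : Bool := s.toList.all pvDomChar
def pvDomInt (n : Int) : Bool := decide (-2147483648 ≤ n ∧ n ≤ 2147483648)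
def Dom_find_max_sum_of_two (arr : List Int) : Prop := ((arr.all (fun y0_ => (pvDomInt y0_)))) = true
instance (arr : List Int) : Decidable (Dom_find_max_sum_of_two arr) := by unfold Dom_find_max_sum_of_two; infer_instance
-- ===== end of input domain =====

-- B replaces A's incremental sliding-window update by a direct max over freshly summed
-- 3-element windows (objective: simpler). Both raise on lists shorter than 3 (excluded by Pre_).

-- ===== PORT A =====
def find_max_sum_of_two (arr : List Int) : Int :=
  let k : Int := 3
  let n : Int := (arr.length : Int)
  let init : Int := (PySem.List.pyRange 0 k 1).foldl (fun s i => s + PySem.List.pyGetD arr i 0) 0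
  let r := (PySem.List.pyRange 0 (n - k) 1).foldl
    (fun (p : Int × Int) i =>
      let ws := p.2 + PySem.List.pyGetD arr (i + k) 0 - PySem.List.pyGetD arr i 0
      (max ws p.1, ws))
    (init, init)
  r.1

-- ===== PORT B =====
def find_max_sum_of_two_alt (arr : List Int) : Int :=
  (PySem.List.max?
    ((PySem.List.pyRange 0 ((arr.length : Int) - 2) 1).map
      (fun i => PySem.List.pyGetD arr i 0 + PySem.List.pyGetD arr (i + 1) 0 + PySem.List.pyGetD arr (i + 2) 0))
    (fun y => y)).getD 0

-- ===== PRECONDITION & SPEC =====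
-- A raises IndexError (and B raises ValueError) when the list has fewer than 3 elements.
def Pre_find_max_sum_of_two (arr : List Int) : Prop := 3 ≤ arr.length
instance (arr : List Int) : Decidable (Pre_find_max_sum_of_two arr) := by
  unfold Pre_find_max_sum_of_two; infer_instance
def pvWitness_find_max_sum_of_two : List Int := [1, 2, 3]
def Spec_find_max_sum_of_two (arr : List Int) (out : Int) : Prop := out = find_max_sum_of_two_alt arr
instance (arr : List Int) (out : Int) : Decidable (Spec_find_max_sum_of_two arr out) := by
  unfold Spec_find_max_sum_of_two; infer_instance

-- ===== CLAIM (what is proved, stated in full; the proofs are below) =====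
def Claim_equal_find_max_sum_of_two : Prop := ∀ (arr : List Int), Dom_find_max_sum_of_two arr → Pre_find_max_sum_of_two arr → Spec_find_max_sum_of_two arr (find_max_sum_of_two arr)

-- ===== LEMMAS AND PROOFS =====

-- the sum of the 3-element window starting at i
def pvW (arr : List Int) (i : Int) : Int :=
  PySem.List.pyGetD arr i 0 + PySem.List.pyGetD arr (i + 1) 0 + PySem.List.pyGetD arr (i + 2) 0

-- A's pair-fold starting at window a computes the running max of the window sums w (a+1) … w (a+m).
theorem pvFoldA (arr : List Int) : ∀ (m : Nat) (a ms : Int),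
    ((PySem.List.pyRange a (a + m) 1).foldl
      (fun (p : Int × Int) i =>
        (max (p.2 + PySem.List.pyGetD arr (i + 3) 0 - PySem.List.pyGetD arr i 0) p.1,
         p.2 + PySem.List.pyGetD arr (i + 3) 0 - PySem.List.pyGetD arr i 0))
      (ms, pvW arr a)).1
    = (PySem.List.pyRange (a + 1) (a + 1 + m) 1).foldl (fun acc j => max acc (pvW arr j)) ms := by
  intro m
  induction m with
  | zero =>
    intro a ms
    simp [PySem.List.pyRange_one_eq_nil]
  | succ m ih =>
    intro a ms
    rw [show (a + ((m : Nat) + 1 : Nat) : Int) = (a + 1) + m by push_cast; ring,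
        PySem.List.pyRange_one_cons (by omega : a < a + 1 + (m : Int)),
        show (a + 1 + ((m : Nat) + 1 : Nat) : Int) = (a + 1 + 1) + m by push_cast; ring,
        PySem.List.pyRange_one_cons (by omega : a + 1 < a + 1 + 1 + (m : Int))]
    simp only [List.foldl_cons]
    have hw : pvW arr a + PySem.List.pyGetD arr (a + 3) 0 - PySem.List.pyGetD arr a 0
        = pvW arr (a + 1) := by
      simp only [pvW]
      rw [show a + 1 + 1 = a + 2 by ring, show a + 1 + 2 = a + 3 by ring]
      ring
    rw [hw]
    rw [ih (a + 1) (max (pvW arr (a + 1)) ms)]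
    rw [max_comm]

theorem find_max_sum_of_two_eq (arr : List Int) (h : 3 ≤ arr.length) :
    find_max_sum_of_two arr = find_max_sum_of_two_alt arr := by
  have hm : ∃ m : Nat, arr.length = m + 3 := ⟨arr.length - 3, by omega⟩
  obtain ⟨m, hlen⟩ := hm
  unfold find_max_sum_of_two find_max_sum_of_two_alt
  simp only [hlen]
  -- A's initial window sum is pvW arr 0
  have hinit : (PySem.List.pyRange 0 3 1).foldl (fun s i => s + PySem.List.pyGetD arr i 0) 0
      = pvW arr 0 := by
    have h3 : PySem.List.pyRange 0 3 1 = [0, 1, 2] := by decide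
    rw [h3]
    simp [pvW]
  rw [hinit]
  -- A side: rewrite the fold range as pyRange 0 (0 + m)
  have hA : ((m + 3 : Nat) : Int) - 3 = (0 : Int) + m := by push_cast; ring
  rw [hA]
  have := pvFoldA arr m 0 (pvW arr 0)
  rw [this]
  -- B side
  have hB : ((m + 3 : Nat) : Int) - 2 = (0 : Int) + (1 + (m : Int)) := by push_cast; ring
  rw [hB]
  rw [PySem.List.pyRange_one_cons (by omega : (0 : Int) < 0 + (1 + (m : Int)))]
  simp only [List.map_cons, PySem.List.max?_id_cons, Option.getD_some, List.foldl_map]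
  have hr : (0 : Int) + 1 + m = 0 + (1 + (m : Int)) := by ring
  rw [hr]
  norm_num [pvW]

-- ===== VERDICT (by name: the statement is the Claim_ definition above) =====
theorem find_max_sum_of_two_spec : Claim_equal_find_max_sum_of_two := by
  intro arr _ hpre
  unfold Spec_find_max_sum_of_two
  exact find_max_sum_of_two_eq arr hpre
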